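-- pv_equiv track=rewrite | github.com/phylowheeler/CLOAK | cloak.py | get_divvied_results_as_array_of_dicts
-- ===== SOURCE A (Python) =====
-- def get_divvied_results_as_array_of_dicts(all_indices, toSearch):
--     someArray = []
--     for indices in all_indices:
--         myDict = {}
--         for i in range(len(indices)):
--             if indices[i] != "-":
--                 myDict[indices[i]] = []
--         for i in range(len(indices)):
--             if indices[i] == "-":
--                 for x in myDict:
--                     myDict[x].append("-")
--             else:
--                 curr = indices[i]
--                 myDict[curr].append(toSearch[i])
--                 for k in myDict:
--                     if k != curr:
--                         myDict[k].append("-")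
--         someArray.append(myDict)
--     return someArray
-- ===== SOURCE B (Python) =====
-- def get_divvied_results_as_array_of_dicts(all_indices, toSearch):
--     result = []
--     for indices in all_indices:
--         keys = dict.fromkeys(s for s in indices if s != "-")
--         result.append({k: ["-" if s != k else toSearch[i]
--                            for i, s in enumerate(indices)]
--                        for k in keys})
--     return result
-- ===== Notes on version B (the rewrite author's own statement) =====
-- stated objective: simpler
-- what changed: B transposes A's loop structure: instead of one positional pass that advances every key's list in lockstep via dict mutation, B first dedups the non-dash symbols and then builds each key's whole column with one comprehension over the row.
import Mathlib
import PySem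

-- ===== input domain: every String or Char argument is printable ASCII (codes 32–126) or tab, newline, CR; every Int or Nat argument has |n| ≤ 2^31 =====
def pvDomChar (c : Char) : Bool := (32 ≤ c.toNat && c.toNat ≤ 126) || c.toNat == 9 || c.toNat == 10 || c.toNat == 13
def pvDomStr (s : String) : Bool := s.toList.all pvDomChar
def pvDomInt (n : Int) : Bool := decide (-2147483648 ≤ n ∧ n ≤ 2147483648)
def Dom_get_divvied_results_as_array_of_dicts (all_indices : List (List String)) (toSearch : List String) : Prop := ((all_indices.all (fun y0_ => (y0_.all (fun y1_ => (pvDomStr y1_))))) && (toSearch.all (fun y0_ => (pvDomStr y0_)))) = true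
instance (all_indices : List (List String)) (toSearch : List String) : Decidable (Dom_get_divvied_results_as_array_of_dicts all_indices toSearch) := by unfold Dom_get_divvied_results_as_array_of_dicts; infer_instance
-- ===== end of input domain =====

-- B dedups the non-dash symbols first and builds each key's whole dash-padded column with one map
-- over the row, instead of A's single positional pass mutating every key's list in lockstep (simpler decomposition).
-- Pre_ excludes only the inputs on which the Python A raises IndexError (a non-dash entry at a
-- position beyond toSearch); B raises there too.


-- ===== PORT A =====
-- one row of A: build the dict of non-dash keys (all []), then the positional pass appending
-- toSearch[i] to the current key and "-" to every other key (toSearch[i] total via getD "";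
-- Pre_ excludes the IndexError inputs)
def pvRowA (indices : List String) (toSearch : List String) : List (String × List String) :=
  let d0 : PySem.Dict String (List String) :=
    indices.foldl (fun d s => if s ≠ "-" then d.insert s [] else d) PySem.Dict.empty
  let d1 : PySem.Dict String (List String) :=
    (PySem.List.enumerate indices).foldl (fun d p =>
      if p.2 = "-" then
        d.keys.foldl (fun d' x => PySem.Dict.modify d' x [] (fun v => v ++ ["-"])) d
      else
        let t := (PySem.List.pyGet? toSearch p.1).getD ""
        let d' := PySem.Dict.modify d p.2 [] (fun v => v ++ [t])
        d'.keys.foldl (fun d'' k => if k ≠ p.2 then PySem.Dict.modify d'' k [] (fun v => v ++ ["-"]) else d'') d') d0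
  d1.items

def get_divvied_results_as_array_of_dicts (all_indices : List (List String)) (toSearch : List String) : List (List (String × List String)) :=
  all_indices.foldl (fun someArray indices => someArray ++ [pvRowA indices toSearch]) []

-- ===== PORT B =====
-- one row of B: ordered dedup of the non-dash symbols, then each key's full column in one map
def pvRowB (indices : List String) (toSearch : List String) : List (String × List String) :=
  let keys := PySem.List.dedup (indices.filter (fun s => s != "-"))
  keys.map (fun k => (k, (PySem.List.enumerate indices).map
    (fun p => if p.2 ≠ k then "-" else (PySem.List.pyGet? toSearch p.1).getD "")))

def get_divvied_results_as_array_of_dicts_alt (all_indices : List (List String)) (toSearch : List String) : List (List (String × List String)) :=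
  all_indices.map (fun indices => pvRowB indices toSearch)

-- ===== PRECONDITION & SPEC =====
-- Pre_ excludes exactly the inputs on which the Python A raises IndexError: some row has a
-- non-dash entry at a position i with i ≥ len(toSearch) (A evaluates toSearch[i] there).
def Pre_get_divvied_results_as_array_of_dicts (all_indices : List (List String)) (toSearch : List String) : Prop :=
  ∀ row ∈ all_indices, ∀ i < row.length, row.getD i "" ≠ "-" → i < toSearch.length
instance (all_indices : List (List String)) (toSearch : List String) : Decidable (Pre_get_divvied_results_as_array_of_dicts all_indices toSearch) := by unfold Pre_get_divvied_results_as_array_of_dicts; infer_instance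

def pvWitness_get_divvied_results_as_array_of_dicts : List (List String) × List String :=
  ([["a", "-", "b"], ["a"]], ["x", "y", "z"])

def Spec_get_divvied_results_as_array_of_dicts (all_indices : List (List String)) (toSearch : List String) (out : List (List (String × List String))) : Prop := out = get_divvied_results_as_array_of_dicts_alt all_indices toSearch
instance (all_indices : List (List String)) (toSearch : List String) (out : List (List (String × List String))) : Decidable (Spec_get_divvied_results_as_array_of_dicts all_indices toSearch out) := by unfold Spec_get_divvied_results_as_array_of_dicts; infer_instance

-- ===== CLAIM (what is proved, stated in full; the proofs are below) =====
def Claim_equal_get_divvied_results_as_array_of_dicts : Prop := ∀ (all_indices : List (List String)) (toSearch : List String), Dom_get_divvied_results_as_array_of_dicts all_indices toSearch → Pre_get_divvied_results_as_array_of_dicts all_indices toSearch → Spec_get_divvied_results_as_array_of_dicts all_indices toSearch (get_divvied_results_as_array_of_dicts all_indices toSearch)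

-- ===== LEMMAS AND PROOFS =====

-- a dict whose items are ks.map (fun k => (k, g k))
def pvDM (ks : List String) (g : String → List String) : PySem.Dict String (List String) :=
  PySem.Dict.mk (ks.map (fun k => (k, g k)))

theorem pvDM_keys (ks : List String) (g : String → List String) : (pvDM ks g).keys = ks := by
  simp [pvDM, PySem.Dict.keys, Function.comp_def]

theorem pvDM_contains (ks : List String) (g : String → List String) (x : String) :
    (pvDM ks g).contains x = decide (x ∈ ks) := by
  rw [PySem.Dict.contains_eq_decide_mem_keys, pvDM_keys]

theorem pvDM_getD (ks : List String) (g : String → List String) (x : String)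
    (hnd : ks.Nodup) (hx : x ∈ ks) (d0 : List String) : (pvDM ks g).getD x d0 = g x := by
  refine PySem.Dict.getD_of_mem_items _ ?_ ?_ d0
  · exact List.mem_map_of_mem hx
  · rw [pvDM_keys]; exact hnd

theorem pvDM_insert_mem (ks : List String) (g : String → List String) (x : String)
    (hx : x ∈ ks) (v : List String) :
    (pvDM ks g).insert x v = pvDM ks (fun k => if k = x then v else g k) := by
  have hc : (pvDM ks g).contains x = true := by rw [pvDM_contains]; exact decide_eq_true hx
  apply PySem.Dict.ext
  rw [PySem.Dict.items_insert_of_contains _ _ hc]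
  simp only [pvDM, List.map_map]
  refine List.map_congr_left (fun k _ => ?_)
  by_cases h : k = x
  · subst h; simp
  · simp [h, Function.comp]

theorem pvDM_insert_not_mem (ks : List String) (g : String → List String) (x : String)
    (hx : x ∉ ks) (v : List String) :
    (pvDM ks g).insert x v = pvDM (ks ++ [x]) (fun k => if k = x then v else g k) := by
  have hc : (pvDM ks g).contains x = false := by
    rw [pvDM_contains]; exact decide_eq_false hx
  apply PySem.Dict.ext
  rw [PySem.Dict.items_insert_of_not_contains _ _ hc]
  simp only [pvDM, List.map_append, List.map_cons, List.map_nil]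
  refine congrArg (· ++ [(x, v)]) (List.map_congr_left (fun k hk => ?_))
  have : k ≠ x := fun h => hx (h ▸ hk)
  simp [this]

-- the key-building loop: starting from a dict with keys ks (all values []), a pass over xs
-- inserting each non-dash symbol with value [] yields the dict over Set.update ks (non-dash xs)
theorem pvL1 (xs ks : List String) :
    xs.foldl (fun d s => if s ≠ "-" then d.insert s ([] : List String) else d) (pvDM ks (fun _ => []))
      = pvDM (PySem.Set.update ks (xs.filter (fun s => s != "-"))) (fun _ => []) := by
  induction xs generalizing ks with
  | nil => simp [PySem.Set.update]
  | cons s xs ih =>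
    by_cases hs : s = "-"
    · subst hs
      simpa using ih ks
    · have hfil : (s :: xs).filter (fun s => s != "-") = s :: xs.filter (fun s => s != "-") := by
        simp [hs]
      rw [hfil, PySem.Set.update_cons]
      by_cases hm : s ∈ ks
      · have : (pvDM ks (fun _ => ([] : List String))).insert s [] = pvDM ks (fun _ => []) := by
          rw [pvDM_insert_mem ks _ s hm]
          simp [pvDM]
        simp only [List.foldl_cons, if_pos hs, this, PySem.Set.add_of_mem hm]
        exact ih ks
      · have : (pvDM ks (fun _ => ([] : List String))).insert s [] = pvDM (ks ++ [s]) (fun _ => []) := by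
          rw [pvDM_insert_not_mem ks _ s hm]
          simp [pvDM]
        simp only [List.foldl_cons, if_pos hs, this, PySem.Set.add_of_not_mem hm]
        exact ih (ks ++ [s])

-- a conditional-modify pass over l (l ⊆ ks, l nodup) appends [v] exactly to the keys of l
-- satisfying P
theorem pvCM (l ks : List String) (g : String → List String) (v : String) (P : String → Prop)
    [DecidablePred P] (hnd : ks.Nodup) (hl : l.Nodup) (hsub : ∀ x ∈ l, x ∈ ks) :
    l.foldl (fun d x => if P x then PySem.Dict.modify d x [] (fun w => w ++ [v]) else d) (pvDM ks g)
      = pvDM ks (fun k => if k ∈ l ∧ P k then g k ++ [v] else g k) := by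
  induction l generalizing g with
  | nil => simp [pvDM]
  | cons x l ih =>
    have hx : x ∈ ks := hsub x (List.mem_cons_self ..)
    have hxl : x ∉ l := (List.nodup_cons.mp hl).1
    have hl' : l.Nodup := (List.nodup_cons.mp hl).2
    have hsub' : ∀ y ∈ l, y ∈ ks := fun y hy => hsub y (List.mem_cons_of_mem _ hy)
    by_cases hP : P x
    · have hstep : PySem.Dict.modify (pvDM ks g) x [] (fun w => w ++ [v])
          = pvDM ks (fun k => if k = x then g k ++ [v] else g k) := by
        unfold PySem.Dict.modify
        rw [pvDM_getD ks g x hnd hx, pvDM_insert_mem ks g x hx]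
        unfold pvDM
        refine congrArg _ (List.map_congr_left (fun k _ => ?_))
        by_cases h : k = x
        · subst h; simp
        · simp [h]
      simp only [List.foldl_cons, if_pos hP, hstep]
      rw [ih _ hl' hsub']
      unfold pvDM
      refine congrArg _ (List.map_congr_left (fun k _ => ?_))
      by_cases h : k = x
      · subst h
        simp [hxl, hP]
      · simp [h, List.mem_cons]
    · simp only [List.foldl_cons, if_neg hP]
      rw [ih _ hl' hsub']
      unfold pvDM
      refine congrArg _ (List.map_congr_left (fun k _ => ?_))
      by_cases h : k = x
      · subst h; simp [hP]
      · simp [h, List.mem_cons]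

-- the main positional pass of A, over a dict with the fixed non-dash key set ks
theorem pvL2 (toSearch : List String) (e : List (Int × String)) (ks : List String)
    (g : String → List String) (hnd : ks.Nodup) (hdash : "-" ∉ ks)
    (he : ∀ p ∈ e, p.2 = "-" ∨ p.2 ∈ ks) :
    e.foldl (fun d p =>
      if p.2 = "-" then
        d.keys.foldl (fun d' x => PySem.Dict.modify d' x [] (fun v => v ++ ["-"])) d
      else
        let t := (PySem.List.pyGet? toSearch p.1).getD ""
        let d' := PySem.Dict.modify d p.2 [] (fun v => v ++ [t])
        d'.keys.foldl (fun d'' k => if k ≠ p.2 then PySem.Dict.modify d'' k [] (fun v => v ++ ["-"]) else d'') d') (pvDM ks g)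
      = pvDM ks (fun k => g k ++ e.map (fun p => if p.2 ≠ k then "-" else (PySem.List.pyGet? toSearch p.1).getD "")) := by
  induction e generalizing g with
  | nil =>
    simp [pvDM]
  | cons p e ih =>
    have he' : ∀ q ∈ e, q.2 = "-" ∨ q.2 ∈ ks := fun q hq => he q (List.mem_cons_of_mem _ hq)
    by_cases hp : p.2 = "-"
    · have hfold : (pvDM ks g).keys.foldl (fun d' x => PySem.Dict.modify d' x [] (fun v => v ++ ["-"])) (pvDM ks g)
          = pvDM ks (fun k => if k ∈ ks ∧ True then g k ++ ["-"] else g k) := by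
        rw [pvDM_keys]
        have : (fun (d' : PySem.Dict String (List String)) x => PySem.Dict.modify d' x [] (fun v => v ++ ["-"]))
            = fun d' x => if True then PySem.Dict.modify d' x [] (fun v => v ++ ["-"]) else d' := by
          funext d' x; simp
        rw [this]
        exact pvCM ks ks g "-" (fun _ => True) hnd hnd (fun x hx => hx)
      simp only [List.foldl_cons, if_pos hp, hfold]
      rw [ih _ he']
      unfold pvDM
      refine congrArg _ (List.map_congr_left (fun k hk => ?_))
      have hk' : p.2 ≠ k := by rw [hp]; exact fun h => hdash (h ▸ hk)
      simp [hk, hk', List.append_assoc]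
    · have hpk : p.2 ∈ ks := (he p (List.mem_cons_self ..)).resolve_left hp
      set t := (PySem.List.pyGet? toSearch p.1).getD "" with ht
      have hstep : PySem.Dict.modify (pvDM ks g) p.2 [] (fun v => v ++ [t])
          = pvDM ks (fun k => if k = p.2 then g k ++ [t] else g k) := by
        unfold PySem.Dict.modify
        rw [pvDM_getD ks g p.2 hnd hpk, pvDM_insert_mem ks g p.2 hpk]
        unfold pvDM
        refine congrArg _ (List.map_congr_left (fun k _ => ?_))
        by_cases h : k = p.2
        · subst h; simp
        · simp [h]
      have hfold : ∀ g' : String → List String,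
          (pvDM ks g').keys.foldl (fun d'' k => if k ≠ p.2 then PySem.Dict.modify d'' k [] (fun v => v ++ ["-"]) else d'') (pvDM ks g')
            = pvDM ks (fun k => if k ∈ ks ∧ k ≠ p.2 then g' k ++ ["-"] else g' k) := by
        intro g'
        rw [pvDM_keys]
        exact pvCM ks ks g' "-" (fun k => k ≠ p.2) hnd hnd (fun x hx => hx)
      simp only [List.foldl_cons, if_neg hp]
      rw [hstep, hfold]
      rw [ih _ he']
      unfold pvDM
      refine congrArg _ (List.map_congr_left (fun k hk => ?_))
      by_cases h : k = p.2
      · subst h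
        simp [hk, ht, List.append_assoc]
      · have : p.2 ≠ k := fun hh => h hh.symm
        simp [hk, h, this, List.append_assoc]

-- row-level agreement: A's row dict equals B's row
theorem pvRow_eq (indices toSearch : List String) : pvRowA indices toSearch = pvRowB indices toSearch := by
  unfold pvRowA pvRowB
  set ks := PySem.List.dedup (indices.filter (fun s => s != "-")) with hks
  have hks' : ks = PySem.Set.ofList (indices.filter (fun s => s != "-")) := by
    rw [hks, PySem.List.dedup_eq_ofList]
  have hnd : ks.Nodup := by rw [hks']; exact PySem.Set.nodup_ofList _
  have hdash : "-" ∉ ks := by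
    rw [hks']
    intro h
    have := (PySem.Set.mem_ofList ..).mp h
    simp [List.mem_filter] at this
  have hd0 : indices.foldl (fun d s => if s ≠ "-" then d.insert s ([] : List String) else d) PySem.Dict.empty
      = pvDM ks (fun _ => []) := by
    have : (PySem.Dict.empty : PySem.Dict String (List String)) = pvDM [] (fun _ => []) := rfl
    rw [this, pvL1, hks', PySem.Set.update_nil_left]
  have he : ∀ p ∈ PySem.List.enumerate indices, p.2 = "-" ∨ p.2 ∈ ks := by
    intro p hp
    by_cases h : p.2 = "-"
    · exact Or.inl h
    · refine Or.inr ?_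
      obtain ⟨k, hk, rfl⟩ := (PySem.List.mem_enumerate_iff ..).mp hp
      rw [hks']
      refine (PySem.Set.mem_ofList ..).mpr ?_
      refine List.mem_filter.mpr ⟨List.getElem_mem _, ?_⟩
      simpa using h
  simp only [hd0]
  rw [pvL2 toSearch _ ks _ hnd hdash he]
  simp [pvDM]

theorem pvFoldl_append (all_indices : List (List String)) (toSearch : List String)
    (acc : List (List (String × List String))) :
    all_indices.foldl (fun someArray indices => someArray ++ [pvRowA indices toSearch]) acc
      = acc ++ all_indices.map (fun indices => pvRowA indices toSearch) := by
  induction all_indices generalizing acc with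
  | nil => simp
  | cons r rs ih => simp [ih, List.append_assoc]

-- ===== VERDICT (by name: the statement is the Claim_ definition above) =====
theorem get_divvied_results_as_array_of_dicts_spec : Claim_equal_get_divvied_results_as_array_of_dicts := by
  intro all_indices toSearch _ _
  unfold Spec_get_divvied_results_as_array_of_dicts
  unfold get_divvied_results_as_array_of_dicts get_divvied_results_as_array_of_dicts_alt
  rw [pvFoldl_append]
  simp only [List.nil_append]
  exact List.map_congr_left (fun indices _ => pvRow_eq indices toSearch)
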